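-- pv_equiv track=rewrite | github.com/james5635/GeekForGeek-Data-Structure-and-Algorithm | hashing/easy/duplicate_within_k/solution.py | first_duplicate_within_k
-- ===== SOURCE A (Python) =====
-- def first_duplicate_within_k(arr, k):
--     """
--     Find the first pair of duplicates within k distance.
--
--     Args:
--         arr: List of integers
--         k: Maximum allowed distance between duplicates
--
--     Returns:
--         tuple: (element, index1, index2) or None if no duplicate found
--     """
--     if not arr or k <= 0:
--         return None
--
--     window = {}
--
--     for i, num in enumerate(arr):
--         if num in window:
--             return (num, window[num], i)
--
--         window[num] = i
--
--         # Remove oldest element when window exceeds size k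
--         if i >= k:
--             oldest_element = arr[i - k]
--             if window.get(oldest_element) == i - k:
--                 del window[oldest_element]
--
--     return None
-- ===== SOURCE B (Python) =====
-- def first_duplicate_within_k(arr, k):
--     """
--     Find the first pair of duplicates within k distance.
--
--     Returns (element, index1, index2) or None, where index1 is the most
--     recent earlier occurrence of arr[index2] at distance <= k.
--     """
--     if not arr or k <= 0:
--         return None
--     n = len(arr)
--     for i in range(n):
--         x = arr[i]
--         for j in range(i - 1, max(0, i - k) - 1, -1):
--             if arr[j] == x:
--                 return (x, j, i)
--     return None
-- ===== Notes on version B (the rewrite author's own statement) =====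
-- stated objective: simpler
-- what changed: Replaced the sliding-window dict (insert/evict bookkeeping) by index-based nested range loops: for each position i, scan the previous min(i,k) positions backwards for a match; no auxiliary state at all.
import Mathlib
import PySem

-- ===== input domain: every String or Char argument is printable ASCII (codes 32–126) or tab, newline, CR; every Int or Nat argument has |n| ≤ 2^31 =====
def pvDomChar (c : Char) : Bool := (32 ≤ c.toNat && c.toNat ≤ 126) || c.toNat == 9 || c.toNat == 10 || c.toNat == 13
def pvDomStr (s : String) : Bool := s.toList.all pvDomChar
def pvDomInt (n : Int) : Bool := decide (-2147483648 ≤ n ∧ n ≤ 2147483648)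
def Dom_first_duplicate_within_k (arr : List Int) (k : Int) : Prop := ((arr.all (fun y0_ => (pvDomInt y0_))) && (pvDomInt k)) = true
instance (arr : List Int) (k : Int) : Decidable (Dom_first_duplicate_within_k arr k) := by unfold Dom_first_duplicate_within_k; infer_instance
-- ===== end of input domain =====

-- B replaces A's sliding-window dict by stateless nested index ranges: for each i, scan
-- the previous min(i,k) positions backwards (simpler: no auxiliary state); return values proved equal.

-- ===== PORT A =====
-- window update of one loop iteration: insert the current element, then evict the element
-- that fell out of the window (faithful to A's `window[num] = i; if i >= k: ...` block)
def fdkStep (arr : List Int) (k : Int) (i : Int) (num : Int)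
    (window : PySem.Dict Int Int) : PySem.Dict Int Int :=
  let w1 := window.insert num i
  if i ≥ k then
    match PySem.List.pyGet? arr (i - k) with
    | some oldest => if w1.get? oldest = some (i - k) then w1.erase oldest else w1
    | none => w1  -- unreachable: 0 ≤ i - k < arr.length at every call
  else w1

-- `for i, num in enumerate(arr)` as structural recursion on the remaining suffix
def fdkGoA (arr : List Int) (k : Int) (rest : List Int) (i : Int)
    (window : PySem.Dict Int Int) : Option (Int × Int × Int) :=
  match rest with
  | [] => none
  | num :: rest' =>
    match window.get? num with
    | some j => some (num, j, i)                 -- `if num in window: return (num, window[num], i)`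
    | none => fdkGoA arr k rest' (i + 1) (fdkStep arr k i num window)

def first_duplicate_within_k (arr : List Int) (k : Int) : Option (Int × Int × Int) :=
  if arr = [] ∨ k ≤ 0 then none
  else fdkGoA arr k arr 0 PySem.Dict.empty

-- ===== PORT B =====
-- `for j in range(i - 1, max(0, i - k) - 1, -1): if arr[j] == x: return ...` — first hit of the countdown range
def fdkInner (arr : List Int) (x : Int) (i : Int) (k : Int) : Option Int :=
  (PySem.List.pyRange (i - 1) (max 0 (i - k) - 1) (-1)).findSome? (fun j =>
    if PySem.List.pyGet? arr j = some x then some j else none)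

-- `for i in range(n): x = arr[i]; ... return (x, j, i)` — first i whose backward scan hits
def first_duplicate_within_k_alt (arr : List Int) (k : Int) : Option (Int × Int × Int) :=
  if arr = [] ∨ k ≤ 0 then none
  else
    (PySem.List.pyRange 0 (arr.length : Int) 1).findSome? (fun i =>
      match PySem.List.pyGet? arr i with
      | some x => (fdkInner arr x i k).map (fun j => (x, j, i))
      | none => none)   -- unreachable: i is a valid index

-- ===== PRECONDITION & SPEC =====
def Spec_first_duplicate_within_k (arr : List Int) (k : Int) (out : Option (Int × Int × Int)) : Prop := out = first_duplicate_within_k_alt arr k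
instance (arr : List Int) (k : Int) (out : Option (Int × Int × Int)) : Decidable (Spec_first_duplicate_within_k arr k out) := by unfold Spec_first_duplicate_within_k; infer_instance

-- ===== CLAIM (what is proved, stated in full; the proofs are below) =====
def Claim_equal_first_duplicate_within_k : Prop := ∀ (arr : List Int) (k : Int), Dom_first_duplicate_within_k arr k → Spec_first_duplicate_within_k arr k (first_duplicate_within_k arr k)

-- ===== LEMMAS AND PROOFS =====

-- proof-only backward-scan helper: the value fdkInner computes, in recursive form,
-- and the characterisation of A's window
def fdkScan (arr : List Int) (num : Int) (lo : Int) (j : Int) : Option Int :=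
  if h : 0 ≤ j ∧ lo ≤ j then
    if PySem.List.pyGet? arr j = some num then some j
    else fdkScan arr num lo (j - 1)
  else none
termination_by (j + 1).toNat
decreasing_by omega

-- controlled unfolding of fdkScan
theorem fdkScan_neg (arr : List Int) (num lo j : Int) (h : ¬(0 ≤ j ∧ lo ≤ j)) :
    fdkScan arr num lo j = none := by
  rw [fdkScan]; exact dif_neg h

theorem fdkScan_hit (arr : List Int) (num lo j : Int) (h : 0 ≤ j ∧ lo ≤ j)
    (hm : PySem.List.pyGet? arr j = some num) : fdkScan arr num lo j = some j := by
  rw [fdkScan]; rw [dif_pos h]; rw [if_pos hm]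

theorem fdkScan_miss (arr : List Int) (num lo j : Int) (h : 0 ≤ j ∧ lo ≤ j)
    (hm : ¬ PySem.List.pyGet? arr j = some num) :
    fdkScan arr num lo j = fdkScan arr num lo (j - 1) := by
  rw [fdkScan]; rw [dif_pos h]; rw [if_neg hm]

-- fdkScan is oblivious to a non-positive lower bound
theorem fdkScan_nonpos (arr : List Int) (num lo lo' : Int) (h : lo ≤ 0) (h' : lo' ≤ 0)
    (j : Int) : fdkScan arr num lo j = fdkScan arr num lo' j := by
  have key : ∀ n : Nat, ∀ j : Int, (j + 1).toNat ≤ n →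
      fdkScan arr num lo j = fdkScan arr num lo' j := by
    intro n
    induction n with
    | zero =>
      intro j hj
      rw [fdkScan_neg arr num lo j (by omega), fdkScan_neg arr num lo' j (by omega)]
    | succ n ih =>
      intro j hj
      by_cases h0 : 0 ≤ j
      · by_cases hm : PySem.List.pyGet? arr j = some num
        · rw [fdkScan_hit arr num lo j ⟨h0, by omega⟩ hm,
              fdkScan_hit arr num lo' j ⟨h0, by omega⟩ hm]
        · rw [fdkScan_miss arr num lo j ⟨h0, by omega⟩ hm,
              fdkScan_miss arr num lo' j ⟨h0, by omega⟩ hm]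
          exact ih (j - 1) (by omega)
      · rw [fdkScan_neg arr num lo j (by omega), fdkScan_neg arr num lo' j (by omega)]
  exact key ((j + 1).toNat) j le_rfl

-- a successful fdkScan really found the element
theorem fdkScan_pyGet (arr : List Int) (num lo : Int) (j r : Int)
    (h : fdkScan arr num lo j = some r) : PySem.List.pyGet? arr r = some num := by
  have key : ∀ n : Nat, ∀ j : Int, (j + 1).toNat ≤ n →
      fdkScan arr num lo j = some r → PySem.List.pyGet? arr r = some num := by
    intro n
    induction n with
    | zero =>
      intro j hj hs
      rw [fdkScan_neg arr num lo j (by omega)] at hs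
      exact absurd hs (by simp)
    | succ n ih =>
      intro j hj hs
      by_cases h0 : 0 ≤ j ∧ lo ≤ j
      · by_cases hm : PySem.List.pyGet? arr j = some num
        · rw [fdkScan_hit arr num lo j h0 hm] at hs
          cases hs; exact hm
        · rw [fdkScan_miss arr num lo j h0 hm] at hs
          exact ih (j - 1) (by omega) hs
      · rw [fdkScan_neg arr num lo j h0] at hs
        exact absurd hs (by simp)
  exact key ((j + 1).toNat) j le_rfl h

-- raising the lower bound by one drops exactly a hit at the old bound
theorem fdkScan_shift (arr : List Int) (num lo : Int) (h0 : 0 ≤ lo) (j : Int) :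
    fdkScan arr num (lo + 1) j =
      (fdkScan arr num lo j).bind (fun r => if r = lo then none else some r) := by
  have key : ∀ n : Nat, ∀ j : Int, (j + 1).toNat ≤ n →
      fdkScan arr num (lo + 1) j =
        (fdkScan arr num lo j).bind (fun r => if r = lo then none else some r) := by
    intro n
    induction n with
    | zero =>
      intro j hj
      rw [fdkScan_neg arr num (lo + 1) j (by omega), fdkScan_neg arr num lo j (by omega)]
      rfl
    | succ n ih =>
      intro j hj
      by_cases hja : lo + 1 ≤ j
      · by_cases hm : PySem.List.pyGet? arr j = some num
        · rw [fdkScan_hit arr num (lo + 1) j ⟨by omega, hja⟩ hm,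
              fdkScan_hit arr num lo j ⟨by omega, by omega⟩ hm]
          simp [Option.bind]
          omega
        · rw [fdkScan_miss arr num (lo + 1) j ⟨by omega, hja⟩ hm,
              fdkScan_miss arr num lo j ⟨by omega, by omega⟩ hm]
          exact ih (j - 1) (by omega)
      · by_cases hjb : j = lo
        · rw [fdkScan_neg arr num (lo + 1) j (by omega)]
          by_cases hm : PySem.List.pyGet? arr j = some num
          · rw [fdkScan_hit arr num lo j ⟨by omega, by omega⟩ hm]; simp [hjb]
          · rw [fdkScan_miss arr num lo j ⟨by omega, by omega⟩ hm,
                fdkScan_neg arr num lo (j - 1) (by omega)]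
            rfl
        · rw [fdkScan_neg arr num (lo + 1) j (by omega), fdkScan_neg arr num lo j (by omega)]
          rfl
  exact key ((j + 1).toNat) j le_rfl

-- B's countdown-range findSome? IS the backward scan
theorem fdkInner_eq_scan (arr : List Int) (x i k : Int) :
    fdkInner arr x i k = fdkScan arr x (i - k) (i - 1) := by
  unfold fdkInner
  have key : ∀ n : Nat, ∀ j : Int, (j + 1).toNat ≤ n →
      (PySem.List.pyRange j (max 0 (i - k) - 1) (-1)).findSome? (fun j' =>
        if PySem.List.pyGet? arr j' = some x then some j' else none)
        = fdkScan arr x (i - k) j := by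
    intro n
    induction n with
    | zero =>
      intro j hj
      rw [PySem.List.pyRange_neg_one_eq_nil (by omega),
          fdkScan_neg arr x (i - k) j (by omega)]
      rfl
    | succ n ih =>
      intro j hj
      by_cases hc : 0 ≤ j ∧ i - k ≤ j
      · rw [PySem.List.pyRange_neg_one_cons (by omega), List.findSome?_cons]
        by_cases hm : PySem.List.pyGet? arr j = some x
        · rw [if_pos hm, fdkScan_hit arr x (i - k) j hc hm]
        · rw [if_neg hm, fdkScan_miss arr x (i - k) j hc hm]
          exact ih (j - 1) (by omega)
      · rw [PySem.List.pyRange_neg_one_eq_nil (by omega),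
          fdkScan_neg arr x (i - k) j hc]
        rfl
  exact key ((i - 1) + 1).toNat (i - 1) le_rfl

-- Dict.erase and get? (not in the PYSEM lemma list, proved from the definitions)
theorem dict_get?_erase_self (d : PySem.Dict Int Int) (b : Int) :
    (d.erase b).get? b = none := by
  simp [PySem.Dict.erase, PySem.Dict.get?]

theorem find_congr_aux (l : List (Int × Int)) (a b : Int) (h : a ≠ b) :
    List.find? (fun p => !decide (p.1 = b) && decide (p.1 = a)) l
      = List.find? (fun p => p.1 == a) l := by
  induction l with
  | nil => rfl
  | cons x xs ih =>
    by_cases hx : x.1 = a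
    · rw [List.find?_cons_of_pos (by simp [hx, h]), List.find?_cons_of_pos (by simp [hx])]
    · rw [List.find?_cons_of_neg (by simp [hx]), List.find?_cons_of_neg (by simp [hx]), ih]

theorem dict_get?_erase_of_ne (d : PySem.Dict Int Int) (a b : Int) (h : a ≠ b) :
    (d.erase b).get? a = d.get? a := by
  simp [PySem.Dict.erase, PySem.Dict.get?]
  rw [find_congr_aux d.items a b h]

-- the loop invariant step: one iteration of A's window update preserves
-- `window.get? v = fdkScan arr v (i - k) (i - 1)` for every value v
theorem fdk_inv_step (arr : List Int) (k : Int) (hk : 1 ≤ k) (n : Nat) (num : Int)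
    (hn : arr[n]? = some num)
    (window : PySem.Dict Int Int)
    (hinv : ∀ v, window.get? v = fdkScan arr v ((n : Int) - k) ((n : Int) - 1)) :
    ∀ v, (fdkStep arr k (n : Int) num window).get? v
        = fdkScan arr v (((n : Int) + 1) - k) ((n : Int)) := by
  intro v
  have hlen : n < arr.length := by
    rcases List.getElem?_eq_some_iff.mp hn with ⟨h, _⟩; exact h
  have hgetn : PySem.List.pyGet? arr ((n : Int)) = some num := by
    rw [PySem.List.pyGet?_natCast]; exact hn
  unfold fdkStep
  by_cases hv : v = num
  · subst hv
    rw [fdkScan_hit arr v (((n : Int) + 1) - k) ((n : Int)) ⟨by omega, by omega⟩ hgetn]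
    by_cases hik : (n : Int) ≥ k
    · rw [if_pos hik]
      have hlo : (0:Int) ≤ (n : Int) - k := by omega
      have hlt : ((n : Int) - k).toNat < arr.length := by omega
      have hold : PySem.List.pyGet? arr ((n : Int) - k)
          = some arr[((n : Int) - k).toNat] := by
        rw [PySem.List.pyGet?_of_nonneg _ hlo, List.getElem?_eq_getElem hlt]
      rw [hold]
      dsimp only
      set oldest := arr[((n : Int) - k).toNat] with holddef
      by_cases hov : oldest = v
      · have hq : (window.insert v ((n : Int))).get? oldest = some ((n : Int)) := by
          rw [hov]; apply PySem.Dict.get?_insert_self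
        rw [hq, if_neg (by simp; omega)]
        apply PySem.Dict.get?_insert_self
      · by_cases hc : (window.insert v ((n : Int))).get? oldest = some ((n : Int) - k)
        · rw [if_pos hc, dict_get?_erase_of_ne _ _ _ (fun h => hov h.symm)]
          apply PySem.Dict.get?_insert_self
        · rw [if_neg hc]
          apply PySem.Dict.get?_insert_self
    · rw [if_neg hik]
      apply PySem.Dict.get?_insert_self
  · -- v ≠ num : the head test of the scan fails
    have hmiss : ¬ PySem.List.pyGet? arr ((n : Int)) = some v := by
      rw [hgetn]; intro h; exact hv (Option.some.inj h).symm
    rw [fdkScan_miss arr v (((n : Int) + 1) - k) ((n : Int)) ⟨by omega, by omega⟩ hmiss]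
    have hins : (window.insert num ((n : Int))).get? v = window.get? v := by
      apply PySem.Dict.get?_insert_of_ne
      exact hv
    by_cases hik : (n : Int) ≥ k
    · rw [if_pos hik]
      have hlo : (0:Int) ≤ (n : Int) - k := by omega
      have hlt : ((n : Int) - k).toNat < arr.length := by omega
      have hold : PySem.List.pyGet? arr ((n : Int) - k)
          = some arr[((n : Int) - k).toNat] := by
        rw [PySem.List.pyGet?_of_nonneg _ hlo, List.getElem?_eq_getElem hlt]
      rw [hold]
      dsimp only
      set oldest := arr[((n : Int) - k).toNat] with holddef
      have harith : ((n : Int) + 1) - k = ((n : Int) - k) + 1 := by ring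
      rw [harith, fdkScan_shift arr v ((n : Int) - k) hlo ((n : Int) - 1), ← hinv v]
      by_cases hvo : v = oldest
      · -- the evicted value: erased exactly when its stored index is the old bound
        rw [← hvo]
        cases hs : window.get? v with
        | none =>
          rw [if_neg (by rw [hins, hs]; simp)]
          rw [hins, hs]
          rfl
        | some r =>
          by_cases hr : r = (n : Int) - k
          · rw [if_pos (by rw [hins, hs, hr])]
            rw [dict_get?_erase_self]
            simp [hr]
          · rw [if_neg (by rw [hins, hs]; simp; intro h; exact hr h)]
            rw [hins, hs]
            simp [hr]
      · -- a value untouched by the eviction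
        have hne : window.get? v ≠ some ((n : Int) - k) := by
          intro h
          have := fdkScan_pyGet arr v ((n : Int) - k) ((n : Int) - 1) ((n : Int) - k)
            (by rw [← hinv v]; exact h)
          rw [hold] at this
          exact hvo (Option.some.inj this).symm
        have hfin : ∀ w2 : PySem.Dict Int Int,
            w2.get? v = window.get? v →
            w2.get? v = (window.get? v).bind (fun r => if r = (n : Int) - k then none else some r) := by
          intro w2 hw2
          rw [hw2]
          cases hs : window.get? v with
          | none => rfl
          | some r =>
            have hr : r ≠ (n : Int) - k := by
              intro h; exact hne (by rw [hs, h])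
            simp [hr]
        by_cases hc : (window.insert num ((n : Int))).get? oldest = some ((n : Int) - k)
        · rw [if_pos hc]
          exact hfin _ (by rw [dict_get?_erase_of_ne _ _ _ hvo]; exact hins)
        · rw [if_neg hc]
          exact hfin _ hins
    · rw [if_neg hik]
      rw [hins, hinv v]
      exact fdkScan_nonpos arr v _ _ (by omega) (by omega) _

-- A's suffix loop equals B's findSome? over the remaining index range
theorem fdk_go_eq (arr : List Int) (k : Int) (hk : 1 ≤ k) :
    ∀ (rest : List Int) (n : Nat) (window : PySem.Dict Int Int),
      arr.drop n = rest →
      (∀ v, window.get? v = fdkScan arr v ((n : Int) - k) ((n : Int) - 1)) →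
      fdkGoA arr k rest (n : Int) window
        = (PySem.List.pyRange (n : Int) (arr.length : Int) 1).findSome? (fun i =>
            match PySem.List.pyGet? arr i with
            | some x => (fdkInner arr x i k).map (fun j => (x, j, i))
            | none => none) := by
  intro rest
  induction rest with
  | nil =>
    intro n window hdrop _
    have hlen : arr.length ≤ n := by
      by_contra h
      have := List.drop_eq_nil_iff.mp hdrop
      omega
    rw [PySem.List.pyRange_one_eq_nil (by exact_mod_cast hlen)]
    rfl
  | cons num rest' ih =>
    intro n window hdrop hinv
    have hn : arr[n]? = some num := by
      have h0 : (arr.drop n)[0]? = arr[n + 0]? := List.getElem?_drop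
      rw [hdrop] at h0
      simpa using h0.symm
    have hlen : n < arr.length := by
      rcases List.getElem?_eq_some_iff.mp hn with ⟨h, _⟩; exact h
    have hdrop' : arr.drop (n + 1) = rest' := by
      have h1 : arr.drop (n + 1) = (arr.drop n).drop 1 := by
        rw [List.drop_drop]
      rw [h1, hdrop]; rfl
    rw [PySem.List.pyRange_one_cons (by exact_mod_cast hlen), List.findSome?_cons]
    have hgetn : PySem.List.pyGet? arr ((n : Int)) = some num := by
      rw [PySem.List.pyGet?_natCast]; exact hn
    show fdkGoA arr k (num :: rest') (n : Int) window = _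
    rw [fdkGoA, hinv num, hgetn]
    dsimp only
    rw [fdkInner_eq_scan arr num ((n : Int)) k]
    cases h : fdkScan arr num ((n : Int) - k) ((n : Int) - 1) with
    | some j => rfl
    | none =>
      have hstep := fdk_inv_step arr k hk n num hn window hinv
      have hinv' : ∀ v, (fdkStep arr k (n : Int) num window).get? v
          = fdkScan arr v (((n + 1 : Nat) : Int) - k) (((n + 1 : Nat) : Int) - 1) := by
        intro v
        have := hstep v
        have e1 : (((n + 1 : Nat) : Int)) - k = ((n : Int) + 1) - k := by push_cast; ring
        have e2 : (((n + 1 : Nat) : Int)) - 1 = ((n : Int)) := by push_cast; ring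
        rw [e1, e2]; exact this
      have hrec := ih (n + 1) (fdkStep arr k (n : Int) num window) hdrop' hinv'
      have ec : ((n + 1 : Nat) : Int) = ((n : Int)) + 1 := by push_cast; ring
      rw [ec] at hrec
      simpa using hrec

-- ===== VERDICT (by name: the statement is the Claim_ definition above) =====
theorem first_duplicate_within_k_spec : Claim_equal_first_duplicate_within_k := by
  intro arr k _
  unfold Spec_first_duplicate_within_k first_duplicate_within_k first_duplicate_within_k_alt
  by_cases hg : arr = [] ∨ k ≤ 0
  · rw [if_pos hg, if_pos hg]
  · rw [if_neg hg, if_neg hg]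
    have hk : 1 ≤ k := by omega
    have := fdk_go_eq arr k hk arr 0 PySem.Dict.empty (by simp)
      (by
        intro v
        rw [fdkScan, dif_neg (by omega)]
        simp [PySem.Dict.get?_empty])
    simpa using this
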